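-- pv_equiv track=rewrite | github.com/yadav-ved/GFG-Solution-in-Python | Wifi Range/Wifi Range.py | wifiRange
-- ===== SOURCE A (Python) =====
-- def wifiRange(N, S, X):
--     #code here
--     r = 0
--     count = 0
--     for i in range(N):
--         if S[i]=='1':
--             count += 1
--             if i-r-1>2*X:
--                 return 0
--             r = i
--         if count == 1:
--             if r>X:
--                 return 0
--     if N-r-1>X:
--         return 0
--     return 1
-- ===== SOURCE B (Python) =====
-- def wifiRange(N, S, X):
--     # Per-house coverage: nearest-router distance from the left and from the
--     # right via two sweeps; a house is served iff either distance is <= X.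
--     left = []
--     d = None
--     for i in range(N):
--         if S[i] == '1':
--             d = 0
--         elif d is not None:
--             d = d + 1
--         left.append(d)
--     right = []
--     d = None
--     for i in range(N - 1, -1, -1):
--         if S[i] == '1':
--             d = 0
--         elif d is not None:
--             d = d + 1
--         right.append(d)
--     right.reverse()
--     for l, r in zip(left, right):
--         if not ((l is not None and l <= X) or (r is not None and r <= X)):
--             return 0
--     return 1
-- ===== Notes on version B (the rewrite author's own statement) =====
-- stated objective: alternative
-- what changed: B decides coverage per house: two sweeps (forward and backward) compute each house's distance to the nearest router on that side, and every house must have some distance <= X, instead of A's single scan checking gap inequalities between consecutive routers.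
-- intended difference: On inputs with no router among the first N houses A returns 1 iff N-1<=X because of its phantom r=0 bookkeeping; B returns the intended value: 0 when N>=1 (no house is covered) and 1 when N<=0 (no houses to cover). — e.g. on wifiRange(2, "00", 5): A returns 1, B returns 0
-- outside the precondition, e.g. on wifiRange(5, '1', -1): A returns 0, B raises IndexError
import Mathlib
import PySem

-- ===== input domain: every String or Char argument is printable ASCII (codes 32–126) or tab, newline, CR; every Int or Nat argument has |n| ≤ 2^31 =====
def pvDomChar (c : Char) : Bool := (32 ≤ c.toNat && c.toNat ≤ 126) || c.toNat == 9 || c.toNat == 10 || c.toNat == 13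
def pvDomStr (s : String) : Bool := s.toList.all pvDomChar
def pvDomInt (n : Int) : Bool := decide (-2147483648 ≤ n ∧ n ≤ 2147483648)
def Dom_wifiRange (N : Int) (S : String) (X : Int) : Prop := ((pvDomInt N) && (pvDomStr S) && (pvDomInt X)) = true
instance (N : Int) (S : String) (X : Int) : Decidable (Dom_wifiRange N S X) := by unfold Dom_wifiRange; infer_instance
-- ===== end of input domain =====

-- B replaces A's single scan over router gaps by a per-house check: two sweeps compute each
-- house's distance to the nearest router on either side, all must be ≤ X; objective: alternative.


-- ===== PORT A =====
/-- A's for-loop over `range(N)` with state `(r, count)`, iterated lazily like Python's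
    `range` (fuel = number of remaining iterations, `i` the current index); `none` encodes an
    early `return 0`, and also Python's IndexError on an out-of-range `S[i]` (those inputs are
    excluded by `Pre_wifiRange`). -/
def wifiRangeLoopA (S : String) (X : Int) : Nat → Int → Int → Int → Option Int
  | 0, _, r, _ => some r
  | fuel+1, i, r, count =>
    match PySem.Str.pyGet? S i with
    | none => none
    | some c =>
      if c = '1' then
        if i - r - 1 > 2 * X then none
        else if count + 1 = 1 ∧ i > X then none
        else wifiRangeLoopA S X fuel (i + 1) i (count + 1)
      else
        if count = 1 ∧ r > X then none
        else wifiRangeLoopA S X fuel (i + 1) r count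

def wifiRange (N : Int) (S : String) (X : Int) : Int :=
  match wifiRangeLoopA S X N.toNat 0 0 0 with
  | none => 0
  | some r => if N - r - 1 > X then 0 else 1

-- ===== PORT B =====
/-- B's sweep loop over `range(...)` with stride `step`, iterated lazily like Python's `range`:
    appends the running nearest-router distance `d` (`none` = no router seen yet) per house.
    An out-of-range `S[i]` is Python's IndexError (excluded by `Pre_wifiRange`); the loop stops
    there. -/
def wifiSweepFuel (S : String) (step : Int) :
    Nat → Int → Option Int → List (Option Int) → List (Option Int)
  | 0, _, _, acc => acc
  | fuel+1, i, d, acc =>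
    match PySem.Str.pyGet? S i with
    | none => acc
    | some c =>
      let d' := if c = '1' then some 0 else d.map (· + 1)
      wifiSweepFuel S step fuel (i + step) d' (acc ++ [d'])

/-- `d is not None and d <= X`. -/
def wifiCov (X : Int) (d : Option Int) : Bool :=
  match d with
  | some t => decide (t ≤ X)
  | none => false

def wifiRange_alt (N : Int) (S : String) (X : Int) : Int :=
  let left := wifiSweepFuel S 1 N.toNat 0 none []
  let right := (wifiSweepFuel S (-1) N.toNat (N - 1) none []).reverse
  if (List.zip left right).all (fun lr => wifiCov X lr.1 || wifiCov X lr.2) then 1 else 0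

-- ===== PRECONDITION & SPEC =====
-- Pre_ excludes N > len(S): there both programs raise IndexError, except that A returns 0
-- early when a coverage check already failed on the in-range prefix.
def Pre_wifiRange (N : Int) (S : String) (X : Int) : Prop := N ≤ PySem.Str.len S
instance (N : Int) (S : String) (X : Int) : Decidable (Pre_wifiRange N S X) := by unfold Pre_wifiRange; infer_instance
def pvWitness_wifiRange : Int × String × Int := (4, "1001", 1)

-- On inputs with no router among the first N houses A returns 1 iff N-1<=X because of its
-- phantom r=0 bookkeeping; B returns the intended value: 0 when N>=1 (nothing is covered),
-- 1 when N<=0 (no houses to cover).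
def D_wifiRange (N : Int) (S : String) (X : Int) : Prop :=
  ((S.toList.take N.toNat).all (fun c => c ≠ '1')) = true ∧
    ((1 ≤ N ∧ N - 1 ≤ X) ∨ (N ≤ 0 ∧ N - 1 > X))
instance (N : Int) (S : String) (X : Int) : Decidable (D_wifiRange N S X) := by unfold D_wifiRange; infer_instance

def Spec_wifiRange (N : Int) (S : String) (X : Int) (out : Int) : Prop := ¬ D_wifiRange N S X → out = wifiRange_alt N S X
instance (N : Int) (S : String) (X : Int) (out : Int) : Decidable (Spec_wifiRange N S X out) := by unfold Spec_wifiRange; infer_instance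

def pvDiffWitness_wifiRange : Int × String × Int := (2, "00", 5)
def pvDiffWitnessOut_wifiRange : Int × Int := (1, 0)

-- ===== CLAIM (what is proved, stated in full; the proofs are below) =====
def Claim_unchanged_wifiRange : Prop := ∀ (N : Int) (S : String) (X : Int), Dom_wifiRange N S X → Pre_wifiRange N S X → Spec_wifiRange N S X (wifiRange N S X)
def Claim_changed_wifiRange : Prop := Dom_wifiRange (pvDiffWitness_wifiRange.1) (pvDiffWitness_wifiRange.2.1) (pvDiffWitness_wifiRange.2.2) ∧ Pre_wifiRange (pvDiffWitness_wifiRange.1) (pvDiffWitness_wifiRange.2.1) (pvDiffWitness_wifiRange.2.2) ∧ D_wifiRange (pvDiffWitness_wifiRange.1) (pvDiffWitness_wifiRange.2.1) (pvDiffWitness_wifiRange.2.2) ∧ wifiRange (pvDiffWitness_wifiRange.1) (pvDiffWitness_wifiRange.2.1) (pvDiffWitness_wifiRange.2.2) = pvDiffWitnessOut_wifiRange.1 ∧ wifiRange_alt (pvDiffWitness_wifiRange.1) (pvDiffWitness_wifiRange.2.1) (pvDiffWitness_wifiRange.2.2) = pvDiffWitnessOut_wifiRange.2 ∧ pvDiffWitnessOut_wifiRange.1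 ≠ pvDiffWitnessOut_wifiRange.2
def Claim_exact_wifiRange : Prop := ∀ (N : Int) (S : String) (X : Int), Dom_wifiRange N S X → Pre_wifiRange N S X → D_wifiRange N S X → wifiRange N S X ≠ wifiRange_alt N S X

-- ===== LEMMAS AND PROOFS =====

/-- The rest of A's scan after the first router, as a chain over the remaining router
    positions: `none` = some gap exceeds 2X, else the last router. -/
def wifiChain (X : Int) (r : Int) : List Int → Option Int
  | [] => some r
  | i :: xs => if i - r - 1 > 2 * X then none else wifiChain X i xs

lemma loopA_eq_chain (S : String) (X : Int) : ∀ (fuel : Nat) (i r count : Int),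
    (∀ k : Int, i ≤ k → k < i + fuel → (PySem.Str.pyGet? S k).isSome) →
    (2 ≤ count ∨ (count = 1 ∧ r ≤ X)) →
    wifiRangeLoopA S X fuel i r count =
      wifiChain X r ((PySem.List.pyRange i (i + fuel) 1).filter
        (fun k => PySem.Str.pyGet? S k == some '1')) := by
  intro fuel
  induction fuel with
  | zero =>
    intro i r count _ _
    rw [PySem.List.pyRange_one_eq_nil (by simp)]
    simp [wifiRangeLoopA, wifiChain]
  | succ fuel ih =>
    intro i r count hv hc
    have hcast : i + ((fuel + 1 : Nat) : Int) = (i + 1) + (fuel : Int) := by push_cast; ring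
    rw [hcast, PySem.List.pyRange_one_cons (by omega), List.filter_cons]
    obtain ⟨c, hc'⟩ := Option.isSome_iff_exists.mp (hv i (le_refl i) (by omega))
    have hv' : ∀ k : Int, i + 1 ≤ k → k < (i + 1) + (fuel : Int) →
        (PySem.Str.pyGet? S k).isSome := fun k h1 h2 => hv k (by omega) (by omega)
    by_cases h1 : c = '1'
    · subst h1
      have hb : (PySem.Str.pyGet? S i == some '1') = true := by rw [hc']; decide
      rw [if_pos hb]
      simp only [wifiRangeLoopA, hc', if_true]
      by_cases hg : i - r - 1 > 2 * X
      · simp [wifiChain, hg]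
      · rw [if_neg hg, if_neg (by omega : ¬ (count + 1 = 1 ∧ i > X))]
        unfold wifiChain
        rw [if_neg hg]
        exact ih (i + 1) i (count + 1) hv' (by omega)
    · have hc2 : PySem.List.pyGet? S.toList i = some c := hc'
      have hb : (PySem.Str.pyGet? S i == some '1') = false := by simp [hc2, h1]
      rw [hb]
      simp only [Bool.false_eq_true, if_false]
      simp only [wifiRangeLoopA, hc']
      rw [if_neg h1, if_neg (by omega : ¬ (count = 1 ∧ r > X))]
      exact ih (i + 1) r count hv' hc

lemma loopA_start (S : String) (X : Int) : ∀ (fuel : Nat) (i : Int),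
    (∀ k : Int, i ≤ k → k < i + fuel → (PySem.Str.pyGet? S k).isSome) →
    wifiRangeLoopA S X fuel i 0 0 =
      match (PySem.List.pyRange i (i + fuel) 1).filter
          (fun k => PySem.Str.pyGet? S k == some '1') with
      | [] => some 0
      | p0 :: rest =>
        if p0 - 0 - 1 > 2 * X then none
        else if p0 > X then none
        else wifiChain X p0 rest := by
  intro fuel
  induction fuel with
  | zero =>
    intro i _
    rw [PySem.List.pyRange_one_eq_nil (by simp)]
    simp [wifiRangeLoopA]
  | succ fuel ih =>
    intro i hv
    have hcast : i + ((fuel + 1 : Nat) : Int) = (i + 1) + (fuel : Int) := by push_cast; ring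
    rw [hcast, PySem.List.pyRange_one_cons (by omega), List.filter_cons]
    obtain ⟨c, hc'⟩ := Option.isSome_iff_exists.mp (hv i (le_refl i) (by omega))
    have hv' : ∀ k : Int, i + 1 ≤ k → k < (i + 1) + (fuel : Int) →
        (PySem.Str.pyGet? S k).isSome := fun k h1 h2 => hv k (by omega) (by omega)
    by_cases h1 : c = '1'
    · subst h1
      have hb : (PySem.Str.pyGet? S i == some '1') = true := by rw [hc']; decide
      rw [if_pos hb]
      simp only [wifiRangeLoopA, hc', if_true]
      split_ifs with hg hcnt hx <;>
        first
          | rfl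
          | omega
          | (rw [show (0:Int) + 1 = 1 from by norm_num]
             exact loopA_eq_chain S X fuel (i + 1) i 1 hv' (Or.inr ⟨rfl, by omega⟩))
    · have hc2 : PySem.List.pyGet? S.toList i = some c := hc'
      have hb : (PySem.Str.pyGet? S i == some '1') = false := by simp [hc2, h1]
      rw [hb]
      simp only [Bool.false_eq_true, if_false]
      simp only [wifiRangeLoopA, hc']
      rw [if_neg h1, if_neg (by omega : ¬ ((0:Int) = 1 ∧ (0:Int) > X))]
      exact ih (i + 1) hv'

/-- Proof-side form of B's sweep, structural recursion over the characters. -/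
def sweepL : List Char → Option Int → List (Option Int)
  | [], _ => []
  | c :: cs, d =>
    let d' := if c = '1' then some 0 else d.map (· + 1)
    d' :: sweepL cs d'

lemma length_sweepL (l : List Char) (d : Option Int) : (sweepL l d).length = l.length := by
  induction l generalizing d with
  | nil => rfl
  | cons c cs ih => simp [sweepL, ih]

/-- House `i` (an index into `l`) is within X of some router. -/
def CoveredL (l : List Char) (X : Int) (i : Nat) : Prop :=
  ∃ j : Nat, j < l.length ∧ l[j]? = some '1' ∧ (i : Int) - j ≤ X ∧ (j : Int) - i ≤ X


/-- An integer index that A's scan accepts as a router. -/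
def RouterI (S : String) (N p : Int) : Prop :=
  0 ≤ p ∧ p < N ∧ PySem.Str.pyGet? S p = some '1'

/-- House `i` is within X of some router (integer-index form, A's side). -/
def CoveredI (S : String) (N X i : Int) : Prop :=
  ∃ j, RouterI S N j ∧ i - j ≤ X ∧ j - i ≤ X

lemma chain_getLast (X : Int) : ∀ (rest : List Int) (a pk : Int),
    wifiChain X a rest = some pk → pk = (a :: rest).getLast (by simp) := by
  intro rest
  induction rest with
  | nil => intro a pk h; simpa [wifiChain] using h.symm
  | cons b rest ih =>
    intro a pk h
    unfold wifiChain at h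
    split_ifs at h
    rw [List.getLast_cons (by simp)]
    exact ih b pk h

lemma cover_mid (S : String) (N X : Int) (hX : 0 ≤ X) :
    ∀ (rest : List Int) (a : Int), (∀ p ∈ a :: rest, RouterI S N p) →
      ∀ pk, wifiChain X a rest = some pk →
      ∀ i, a ≤ i → i ≤ pk → CoveredI S N X i := by
  intro rest
  induction rest with
  | nil =>
    intro a hmem pk hch i hai hip
    have hpk : pk = a := by simpa [wifiChain] using hch.symm
    exact ⟨a, hmem a (by simp), by omega, by omega⟩
  | cons b rest ih =>
    intro a hmem pk hch i hai hip
    unfold wifiChain at hch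
    split_ifs at hch with hg
    by_cases hxi : i - a ≤ X
    · exact ⟨a, hmem a (by simp), by omega, by omega⟩
    · by_cases hib : i ≤ b
      · exact ⟨b, hmem b (by simp), by omega, by omega⟩
      · exact ih b (fun p hp => hmem p (by simp at hp ⊢; tauto)) pk hch i (by omega) hip

lemma chain_of_covered (S : String) (N X : Int) (hX : 0 ≤ X) :
    ∀ (rest : List Int) (a : Int), (∀ p ∈ a :: rest, RouterI S N p) →
      List.Pairwise (· < ·) (a :: rest) →
      (∀ j, RouterI S N j → a < j → j ∈ rest) →
      (∀ i, 0 ≤ i → i < N → CoveredI S N X i) →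
      wifiChain X a rest = some ((a :: rest).getLast (by simp)) := by
  intro rest
  induction rest with
  | nil => intro a _ _ _ _; simp [wifiChain]
  | cons b rest ih =>
    intro a hmem hpw hcomp hcov
    have hab : a < b := (List.pairwise_cons.mp hpw).1 b (by simp)
    obtain ⟨ha0, haN, _⟩ := hmem a (by simp)
    obtain ⟨hb0, hbN, _⟩ := hmem b (by simp)
    have hg : ¬ (b - a - 1 > 2 * X) := by
      intro hg
      obtain ⟨j, hjr, hj1, hj2⟩ := hcov (a + X + 1) (by omega) (by omega)
      have hja : a < j := by omega
      have hjb : j < b := by omega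
      have hjmem : j ∈ b :: rest := hcomp j hjr hja
      rcases List.mem_cons.mp hjmem with h | h
      · omega
      · have := (List.pairwise_cons.mp (List.pairwise_cons.mp hpw).2).1 j h
        omega
    unfold wifiChain
    rw [if_neg hg, List.getLast_cons (by simp)]
    refine ih b (fun p hp => hmem p (by simp at hp ⊢; tauto))
      (List.pairwise_cons.mp hpw).2 ?_ hcov
    intro j hjr hbj
    rcases List.mem_cons.mp (hcomp j hjr (by omega)) with h | h
    · omega
    · exact h

lemma le_getLast_of_pairwise : ∀ (l : List Int) (h : l ≠ []),
    List.Pairwise (· < ·) l → ∀ x ∈ l, x ≤ l.getLast h := by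
  intro l
  induction l with
  | nil => intro h; simp at h
  | cons a t ih =>
    intro h hpw x hx
    cases t with
    | nil => simp at hx; simp [hx]
    | cons b t' =>
      rw [List.getLast_cons (by simp)]
      rcases List.mem_cons.mp hx with rfl | hx'
      · have hlast : (b :: t').getLast (by simp) ∈ b :: t' := List.getLast_mem _
        have := (List.pairwise_cons.mp hpw).1 _ hlast
        omega
      · exact ih (by simp) (List.pairwise_cons.mp hpw).2 x hx'

/-- A's three checks on the router list are exactly "every house is within X of a router". -/
lemma routerCase_iff (S : String) (N X p0 : Int) (rest : List Int)
    (hmem : ∀ p, p ∈ p0 :: rest ↔ RouterI S N p)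
    (hpw : List.Pairwise (· < ·) (p0 :: rest)) :
    (p0 ≤ X ∧ ∃ pk, wifiChain X p0 rest = some pk ∧ N - pk - 1 ≤ X) ↔
      (∀ i, 0 ≤ i → i < N → CoveredI S N X i) := by
  obtain ⟨h00, h0N, _⟩ := (hmem p0).mp (by simp)
  constructor
  · rintro ⟨h0X, pk, hch, htail⟩ i hi0 hiN
    have hX : 0 ≤ X := by omega
    have hpkmem : pk ∈ p0 :: rest := by
      rw [chain_getLast X rest p0 pk hch]; exact List.getLast_mem _
    have hpkr := (hmem pk).mp hpkmem
    by_cases hlt : i < p0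
    · exact ⟨p0, (hmem p0).mp (by simp), by omega, by omega⟩
    · by_cases hle : i ≤ pk
      · exact cover_mid S N X hX rest p0 (fun p hp => (hmem p).mp hp) pk hch i (by omega) hle
      · exact ⟨pk, hpkr, by omega, by omega⟩
  · intro hcov
    have hX : 0 ≤ X := by
      obtain ⟨j, _, hj1, hj2⟩ := hcov p0 h00 h0N
      omega
    have h0X : p0 ≤ X := by
      obtain ⟨j, hjr, hj1, hj2⟩ := hcov 0 (by omega) (by omega)
      have hjmem := (hmem j).mpr hjr
      rcases List.mem_cons.mp hjmem with rfl | h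
      · omega
      · have := (List.pairwise_cons.mp hpw).1 j h
        omega
    have hch := chain_of_covered S N X hX rest p0 (fun p hp => (hmem p).mp hp) hpw
      (fun j hjr hlt => by
        rcases List.mem_cons.mp ((hmem j).mpr hjr) with rfl | h
        · omega
        · exact h) hcov
    refine ⟨h0X, (p0 :: rest).getLast (by simp), hch, ?_⟩
    obtain ⟨j, hjr, hj1, hj2⟩ := hcov (N - 1) (by omega) (by omega)
    have hjle : j ≤ (p0 :: rest).getLast (by simp) :=
      le_getLast_of_pairwise _ (by simp) hpw j ((hmem j).mpr hjr)
    omega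

/-- Left-sweep characterisation: the stored distance is within X iff some router at `j ≤ i`
    is within X (or the incoming seed distance is). -/
lemma sweepL_cov_iff (X : Int) : ∀ (l : List Char) (d : Option Int), (∀ t, d = some t → 0 ≤ t) →
    ∀ i : Nat, i < l.length →
    (wifiCov X ((sweepL l d).getD i none) = true ↔
      (∃ j : Nat, j ≤ i ∧ l[j]? = some '1' ∧ (i : Int) - j ≤ X) ∨
      (∃ t, d = some t ∧ t + 1 + i ≤ X)) := by
  intro l
  induction l with
  | nil => intro d _ i hi; simp at hi
  | cons c cs ih =>
    intro d hd i hi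
    cases i with
    | zero =>
      by_cases hc : c = '1'
      · subst hc
        simp only [sweepL, if_true, List.getD_cons_zero, wifiCov]
        constructor
        · intro h
          exact Or.inl ⟨0, le_refl 0, by simp, by simpa using of_decide_eq_true h⟩
        · rintro (⟨j, hj, _, hjx⟩ | ⟨t, ht, htx⟩)
          · interval_cases j
            simp at hjx ⊢
            omega
          · have := hd t ht
            simp
            omega
      · simp only [sweepL, if_neg hc, List.getD_cons_zero]
        cases d with
        | none =>
          simp only [Option.map_none, wifiCov]
          constructor
          · intro h; simp at h
          · rintro (⟨j, hj, hget, _⟩ | ⟨t, ht, _⟩)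
            · interval_cases j
              simp [hc] at hget
            · simp at ht
        | some t =>
          simp only [Option.map_some, wifiCov, decide_eq_true_eq]
          constructor
          · intro h; exact Or.inr ⟨t, rfl, by omega⟩
          · rintro (⟨j, hj, hget, _⟩ | ⟨t', ht', htx⟩)
            · interval_cases j
              simp [hc] at hget
            · simp at ht'; omega
    | succ i =>
      have hi' : i < cs.length := by simpa using hi
      by_cases hc : c = '1'
      · subst hc
        simp only [sweepL, if_true, List.getD_cons_succ]
        rw [ih (some 0) (by rintro t ⟨rfl⟩; omega) i hi']
        constructor
        · rintro (⟨j, hj, hget, hjx⟩ | ⟨t, ht, htx⟩)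
          · refine Or.inl ⟨j + 1, by omega, by simpa using hget, ?_⟩
            push_cast; omega
          · obtain ⟨rfl⟩ := ht
            refine Or.inl ⟨0, by omega, by simp, ?_⟩
            push_cast; omega
        · rintro (⟨j, hj, hget, hjx⟩ | ⟨t, ht, htx⟩)
          · cases j with
            | zero => exact Or.inr ⟨0, rfl, by push_cast at hjx ⊢; omega⟩
            | succ j =>
              refine Or.inl ⟨j, by omega, by simpa using hget, ?_⟩
              push_cast at hjx ⊢; omega
          · have ht0 := hd t ht
            exact Or.inr ⟨0, rfl, by push_cast at htx ⊢; omega⟩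
      · simp only [sweepL, if_neg hc, List.getD_cons_succ]
        rw [ih (d.map (· + 1)) (by
          rintro t ht
          cases d with
          | none => simp at ht
          | some u => simp at ht; have := hd u rfl; omega) i hi']
        constructor
        · rintro (⟨j, hj, hget, hjx⟩ | ⟨t, ht, htx⟩)
          · refine Or.inl ⟨j + 1, by omega, by simpa using hget, ?_⟩
            push_cast; omega
          · cases d with
            | none => simp at ht
            | some u =>
              simp at ht
              exact Or.inr ⟨u, rfl, by push_cast at htx ⊢; omega⟩
        · rintro (⟨j, hj, hget, hjx⟩ | ⟨t, ht, htx⟩)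
          · cases j with
            | zero => simp [hc] at hget
            | succ j =>
              refine Or.inl ⟨j, by omega, by simpa using hget, ?_⟩
              push_cast at hjx ⊢; omega
          · obtain ⟨rfl⟩ := ht
            exact Or.inr ⟨t + 1, by simp, by push_cast at htx ⊢; omega⟩


/-- Right-sweep characterisation via the reversal of `sweepL` on the reversed string. -/
lemma sweepR_cov_iff (X : Int) (l : List Char) (i : Nat) (hi : i < l.length) :
    (wifiCov X (((sweepL l.reverse none).reverse).getD i none) = true ↔
      ∃ j : Nat, i ≤ j ∧ j < l.length ∧ l[j]? = some '1' ∧ (j : Int) - i ≤ X) := by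
  have hlen : (sweepL l.reverse none).length = l.length := by
    rw [length_sweepL]; simp
  have hgd : ((sweepL l.reverse none).reverse).getD i none
      = (sweepL l.reverse none).getD (l.length - 1 - i) none := by
    rw [List.getD_eq_getElem?_getD, List.getD_eq_getElem?_getD,
      List.getElem?_reverse (by omega), hlen]
  rw [hgd, sweepL_cov_iff X l.reverse none (by simp) (l.length - 1 - i) (by simp; omega)]
  constructor
  · rintro (⟨j', hj', hget, hjx⟩ | ⟨t, ht, _⟩)
    · have hj'len : j' < l.length := by omega
      refine ⟨l.length - 1 - j', by omega, by omega, ?_, by omega⟩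
      rw [List.getElem?_reverse (by simpa using hj'len)] at hget
      simpa using hget
    · simp at ht
  · rintro ⟨j, hij, hjlen, hget, hjx⟩
    refine Or.inl ⟨l.length - 1 - j, by omega, ?_, by omega⟩
    rw [List.getElem?_reverse (by omega)]
    have heq : l.length - 1 - (l.length - 1 - j) = j := by omega
    rw [heq]
    exact hget

/-- B's final all-zip test is exactly "every house is covered". -/
lemma allzip_iff (X : Int) (l : List Char) :
    ((List.zip (sweepL l none) ((sweepL l.reverse none).reverse)).all
        (fun lr => wifiCov X lr.1 || wifiCov X lr.2) = true) ↔
      ∀ i : Nat, i < l.length → CoveredL l X i := by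
  have h1 : (sweepL l none).length = l.length := length_sweepL l none
  have h2 : ((sweepL l.reverse none).reverse).length = l.length := by
    rw [List.length_reverse, length_sweepL]; simp
  rw [List.all_eq_true]
  constructor
  · intro h i hi
    have hmemz : (List.zip (sweepL l none) ((sweepL l.reverse none).reverse))[i]'(by
        rw [List.length_zip]; omega) ∈
        List.zip (sweepL l none) ((sweepL l.reverse none).reverse) := List.getElem_mem _
    have hz := h _ hmemz
    rw [List.getElem_zip] at hz
    simp only at hz
    rw [Bool.or_eq_true] at hz
    rcases hz with hl | hr
    · rw [show (sweepL l none)[i]'(by omega) = (sweepL l none).getD i none from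
        (List.getD_eq_getElem _ _ (by omega)).symm,
        sweepL_cov_iff X l none (by simp) i hi] at hl
      rcases hl with ⟨j, hj, hget, hjx⟩ | ⟨t, ht, _⟩
      · exact ⟨j, by omega, hget, hjx, by omega⟩
      · simp at ht
    · rw [show ((sweepL l.reverse none).reverse)[i]'(by omega)
          = ((sweepL l.reverse none).reverse).getD i none from
        (List.getD_eq_getElem _ _ (by omega)).symm,
        sweepR_cov_iff X l i hi] at hr
      obtain ⟨j, hij, hjlen, hget, hjx⟩ := hr
      exact ⟨j, hjlen, hget, by omega, hjx⟩
  · intro hcov x hx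
    obtain ⟨i, hilen, hxeq⟩ := List.mem_iff_getElem.mp hx
    have hi : i < l.length := by
      rw [List.length_zip] at hilen; omega
    rw [← hxeq, List.getElem_zip]
    simp only
    obtain ⟨j, hjlen, hget, hd1, hd2⟩ := hcov i hi
    rw [Bool.or_eq_true]
    by_cases hji : j ≤ i
    · left
      rw [show (sweepL l none)[i]'(by omega) = (sweepL l none).getD i none from
        (List.getD_eq_getElem _ _ (by omega)).symm,
        sweepL_cov_iff X l none (by simp) i hi]
      exact Or.inl ⟨j, hji, hget, hd1⟩
    · right
      rw [show ((sweepL l.reverse none).reverse)[i]'(by omega)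
          = ((sweepL l.reverse none).reverse).getD i none from
        (List.getD_eq_getElem _ _ (by omega)).symm,
        sweepR_cov_iff X l i hi]
      exact ⟨j, by omega, hjlen, hget, hd2⟩


lemma valid_idx (S : String) (N : Int) (hlen : N ≤ (S.toList.length : Int)) :
    ∀ k : Int, (0:Int) ≤ k → k < 0 + ((N.toNat : Nat) : Int) → (PySem.Str.pyGet? S k).isSome := by
  intro k h1 h2
  rw [PySem.Str.pyGet?_eq,
    show PySem.Chars.pyGet? S.toList k = PySem.List.pyGet? S.toList k from rfl,
    Option.isSome_iff_ne_none, Ne, PySem.List.pyGet?_eq_none_iff]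
  exact not_not_intro (by unfold PySem.Raise.InRange; omega)

lemma sweepFuel_up (S : String) : ∀ (fuel : Nat) (i : Int) (d : Option Int)
    (acc : List (Option Int)),
    (∀ k : Int, i ≤ k → k < i + fuel → (PySem.Str.pyGet? S k).isSome) →
    wifiSweepFuel S 1 fuel i d acc =
      acc ++ sweepL ((PySem.List.pyRange i (i + fuel) 1).map
        (fun k => (PySem.Str.pyGet? S k).getD ' ')) d := by
  intro fuel
  induction fuel with
  | zero =>
    intro i d acc _
    rw [PySem.List.pyRange_one_eq_nil (by simp)]
    simp [wifiSweepFuel, sweepL]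
  | succ fuel ih =>
    intro i d acc hv
    have hcast : i + ((fuel + 1 : Nat) : Int) = (i + 1) + (fuel : Int) := by push_cast; ring
    rw [hcast, PySem.List.pyRange_one_cons (by omega), List.map_cons]
    obtain ⟨c, hc'⟩ := Option.isSome_iff_exists.mp (hv i (le_refl i) (by omega))
    have hch : (PySem.Str.pyGet? S i).getD ' ' = c := by rw [hc']; rfl
    rw [hch]
    simp only [wifiSweepFuel, hc', sweepL]
    rw [ih (i + 1) _ _ (fun k h1 h2 => hv k (by omega) (by omega))]
    simp [List.append_assoc]

lemma sweepFuel_down (S : String) : ∀ (fuel : Nat) (i : Int) (d : Option Int)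
    (acc : List (Option Int)),
    (∀ k : Int, i - fuel < k → k ≤ i → (PySem.Str.pyGet? S k).isSome) →
    wifiSweepFuel S (-1) fuel i d acc =
      acc ++ sweepL ((PySem.List.pyRange i (i - fuel) (-1)).map
        (fun k => (PySem.Str.pyGet? S k).getD ' ')) d := by
  intro fuel
  induction fuel with
  | zero =>
    intro i d acc _
    rw [PySem.List.pyRange_neg_one_eq_nil (by simp)]
    simp [wifiSweepFuel, sweepL]
  | succ fuel ih =>
    intro i d acc hv
    have hcast : i - ((fuel + 1 : Nat) : Int) = (i - 1) - (fuel : Int) := by push_cast; ring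
    rw [hcast, PySem.List.pyRange_neg_one_cons (by omega), List.map_cons]
    obtain ⟨c, hc'⟩ := Option.isSome_iff_exists.mp (hv i (by omega) (le_refl i))
    have hch : (PySem.Str.pyGet? S i).getD ' ' = c := by rw [hc']; rfl
    rw [hch]
    simp only [wifiSweepFuel, hc', sweepL]
    rw [show i + (-1 : Int) = i - 1 from by ring,
      ih (i - 1) _ _ (fun k h1 h2 => hv k (by omega) (by omega))]
    simp [List.append_assoc]

lemma map_ch_pyRange (S : String) (N : Int) (h0 : 0 ≤ N) (hlen : N ≤ (S.toList.length : Int)) :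
    (PySem.List.pyRange 0 N 1).map (fun i => (PySem.Str.pyGet? S i).getD ' ')
      = S.toList.take N.toNat := by
  rw [PySem.List.pyRange_one, List.map_map]
  apply List.ext_getElem
  · simp only [List.length_map, List.length_range, List.length_take]
    omega
  · intro i h1 h2
    have hilen : i < S.toList.length := by
      simp only [List.length_map, List.length_range] at h1
      omega
    simp only [List.getElem_map, List.getElem_range, Function.comp, List.getElem_take]
    rw [zero_add, PySem.Str.pyGet?_natCast, List.getElem?_eq_getElem hilen]
    rfl

lemma pyRange_rev (N : Int) :
    PySem.List.pyRange (N - 1) (-1) (-1) = (PySem.List.pyRange 0 N 1).reverse := by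
  have h := PySem.List.pyRange_neg_one_eq_reverse (N - 1) (-1)
  norm_num at h
  exact h

/-- Under the precondition, port B is the all-zip test over the two character sweeps. -/
lemma alt_eq_sweeps (S : String) (N X : Int) (h0 : 0 ≤ N) (hlen : N ≤ (S.toList.length : Int)) :
    wifiRange_alt N S X =
      (if (List.zip (sweepL (S.toList.take N.toNat) none)
            ((sweepL (S.toList.take N.toNat).reverse none).reverse)).all
          (fun lr => wifiCov X lr.1 || wifiCov X lr.2) then 1 else 0) := by
  simp only [wifiRange_alt]
  rw [sweepFuel_up S N.toNat 0 none []
      (fun k h1 h2 => valid_idx S N hlen k h1 h2),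
    sweepFuel_down S N.toNat (N - 1) none []
      (fun k h1 h2 => valid_idx S N hlen k (by omega) (by omega)),
    show (0:Int) + (N.toNat : Int) = N from by omega,
    show (N:Int) - 1 - (N.toNat : Int) = -1 from by omega,
    pyRange_rev, List.map_reverse, map_ch_pyRange S N h0 hlen]
  simp

/-- Integer-side coverage is list-side coverage of the scanned prefix. -/
lemma coveredI_iff_coveredL (S : String) (N X : Int) (h0 : 0 ≤ N)
    (hlen : N ≤ (S.toList.length : Int)) :
    (∀ i : Int, 0 ≤ i → i < N → CoveredI S N X i) ↔
      (∀ i : Nat, i < (S.toList.take N.toNat).length → CoveredL (S.toList.take N.toNat) X i) := by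
  have hlen' : (S.toList.take N.toNat).length = N.toNat := by
    simp only [List.length_take]; omega
  have hget : ∀ j : Nat, j < N.toNat →
      ((S.toList.take N.toNat)[j]? = some '1' ↔ PySem.Str.pyGet? S (j : Int) = some '1') := by
    intro j hj
    have hjlen : j < S.toList.length := by omega
    rw [PySem.Str.pyGet?_natCast]
    rw [List.getElem?_take, if_pos hj]
  constructor
  · intro h i hi
    rw [hlen'] at hi
    obtain ⟨j, ⟨hj0, hjN, hjget⟩, hd1, hd2⟩ := h (i : Int) (by omega) (by omega)
    refine ⟨j.toNat, by omega, ?_, by omega, by omega⟩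
    rw [hget j.toNat (by omega)]
    rwa [show ((j.toNat : Nat) : Int) = j by omega]
  · intro h i hi0 hiN
    obtain ⟨j, hjlen, hjget, hd1, hd2⟩ := h i.toNat (by omega)
    refine ⟨(j : Int), ⟨by omega, by omega, ?_⟩, by omega, by omega⟩
    rw [← hget j (by omega)]
    exact hjget


lemma mem_posI (S : String) (N : Int) (p : Int) :
    p ∈ (PySem.List.pyRange 0 N 1).filter (fun i => PySem.Str.pyGet? S i == some '1') ↔
      RouterI S N p := by
  rw [List.mem_filter, PySem.List.mem_pyRange_one, beq_iff_eq]
  unfold RouterI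
  tauto

lemma pairwise_posI (S : String) (N : Int) :
    List.Pairwise (· < ·)
      ((PySem.List.pyRange 0 N 1).filter (fun i => PySem.Str.pyGet? S i == some '1')) :=
  (PySem.List.pairwise_lt_pyRange_one 0 N).filter _

lemma take_get_router (S : String) (N : Int) (h0 : 0 ≤ N) (hlen : N ≤ (S.toList.length : Int))
    (p : Int) (hp0 : 0 ≤ p) (hpN : p < N) (hget : PySem.Str.pyGet? S p = some '1') :
    '1' ∈ S.toList.take N.toNat := by
  have hp : p = ((p.toNat : Nat) : Int) := by omega
  rw [hp, PySem.Str.pyGet?_natCast] at hget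
  have : (S.toList.take N.toNat)[p.toNat]? = some '1' := by
    rw [List.getElem?_take, if_pos (by omega)]
    exact hget
  exact List.mem_of_getElem? this

lemma noRouter_of_filter_nil (S : String) (N : Int) (h0 : 0 ≤ N)
    (hlen : N ≤ (S.toList.length : Int))
    (hfil : (PySem.List.pyRange 0 N 1).filter (fun i => PySem.Str.pyGet? S i == some '1') = []) :
    ∀ c ∈ S.toList.take N.toNat, c ≠ '1' := by
  intro c hc rfl
  obtain ⟨i, hi, hceq⟩ := List.mem_iff_getElem.mp hc
  have hin : i < N.toNat := by
    have := hi
    simp only [List.length_take] at this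
    omega
  have hmem : ((i : Nat) : Int) ∈ PySem.List.pyRange 0 N 1 := by
    rw [PySem.List.mem_pyRange_one]; omega
  have := List.filter_eq_nil_iff.mp hfil _ hmem
  apply this
  rw [beq_iff_eq, PySem.Str.pyGet?_natCast, List.getElem?_eq_getElem (by omega)]
  have htk : (S.toList.take N.toNat)[i] = S.toList[i]'(by omega) := List.getElem_take
  rw [← htk, hceq]

lemma filter_nil_of_noRouter (S : String) (N : Int) (h0 : 0 ≤ N)
    (hlen : N ≤ (S.toList.length : Int))
    (hno : ∀ c ∈ S.toList.take N.toNat, c ≠ '1') :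
    (PySem.List.pyRange 0 N 1).filter (fun i => PySem.Str.pyGet? S i == some '1') = [] := by
  apply List.filter_eq_nil_iff.mpr
  intro p hp hpred
  rw [PySem.List.mem_pyRange_one] at hp
  rw [beq_iff_eq] at hpred
  exact hno '1' (take_get_router S N h0 hlen p hp.1 hp.2 hpred) rfl

lemma notCovered_of_noRouter (l : List Char) (X : Int) (hno : ∀ c ∈ l, c ≠ '1')
    (i : Nat) : ¬ CoveredL l X i := by
  rintro ⟨j, hj, hget, -, -⟩
  exact hno '1' (List.mem_of_getElem? hget) rfl

-- ===== VERDICT (by name: the statements are the Claim_ definitions above) =====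
theorem wifiRange_spec : Claim_unchanged_wifiRange := by
  intro N S X _ hpre hnd
  have hlen : N ≤ (S.toList.length : Int) := by simpa [PySem.Str.len_eq] using hpre
  show wifiRange N S X = wifiRange_alt N S X
  by_cases h0 : 0 ≤ N
  case neg =>
    unfold D_wifiRange at hnd
    have htk : S.toList.take N.toNat = [] := by
      have : N.toNat = 0 := by omega
      rw [this, List.take_zero]
    have hNX : N - 1 ≤ X := by
      by_contra hgt
      exact hnd ⟨by rw [htk]; rfl, Or.inr ⟨by omega, by omega⟩⟩
    simp only [wifiRange, wifiRange_alt]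
    rw [show N.toNat = 0 from by omega]
    simp only [wifiSweepFuel, wifiRangeLoopA, List.zip_nil_left, List.all_nil, if_true]
    rw [if_neg (by omega : ¬ N - 0 - 1 > X)]
  rw [alt_eq_sweeps S N X h0 hlen]
  unfold wifiRange
  rw [loopA_start S X N.toNat 0 (valid_idx S N hlen),
    show (0:Int) + (N.toNat : Int) = N from by omega]
  have hlenl : (S.toList.take N.toNat).length = N.toNat := by
    simp only [List.length_take]; omega
  cases hfil : (PySem.List.pyRange 0 N 1).filter
      (fun i => PySem.Str.pyGet? S i == some '1') with
  | nil =>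
    have hno := noRouter_of_filter_nil S N h0 hlen hfil
    unfold D_wifiRange at hnd
    have hD1 : ((S.toList.take N.toNat).all (fun c => decide (c ≠ '1'))) = true :=
      List.all_eq_true.mpr (fun c hc => decide_eq_true (hno c hc))
    change (if N - 0 - 1 > X then (0:Int) else 1) = _
    by_cases hN : N = 0
    · have hnil : S.toList.take N.toNat = [] := by
        apply List.eq_nil_of_length_eq_zero; omega
      have hX : ¬ X < -1 := fun hX => hnd ⟨hD1, Or.inr ⟨by omega, by omega⟩⟩
      rw [hnil]
      simp only [List.reverse_nil, sweepL, List.zip_nil_left, List.all_nil, if_true]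
      rw [if_neg (by omega : ¬ N - 0 - 1 > X)]
    · have hX : ¬ (N - 1 ≤ X) := fun hX => hnd ⟨hD1, Or.inl ⟨by omega, hX⟩⟩
      rw [if_pos (by omega : N - 0 - 1 > X),
        if_neg (by
          rw [allzip_iff]
          intro hall
          exact notCovered_of_noRouter _ X hno 0 (hall 0 (by omega)))]
  | cons p0 rest =>
    have hmem : ∀ p, p ∈ p0 :: rest ↔ RouterI S N p := by
      intro p; rw [← hfil, mem_posI]
    have hpw : List.Pairwise (· < ·) (p0 :: rest) := by
      rw [← hfil]; exact pairwise_posI S N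
    have hp0 := (hmem p0).mp (by simp)
    obtain ⟨hp00, hp0N, -⟩ := hp0
    have hiff := routerCase_iff S N X p0 rest hmem hpw
    change (match (if p0 - 0 - 1 > 2 * X then none
        else if p0 > X then none else wifiChain X p0 rest : Option Int) with
      | none => (0:Int)
      | some r => if N - r - 1 > X then 0 else 1) = _
    by_cases hall : ∀ i : Nat, i < (S.toList.take N.toNat).length →
        CoveredL (S.toList.take N.toNat) X i
    · obtain ⟨h0X, pk, hch, htail⟩ :=
        hiff.mpr ((coveredI_iff_coveredL S N X h0 hlen).mpr hall)
      rw [if_neg (by omega : ¬ p0 - 0 - 1 > 2 * X), if_neg (by omega : ¬ p0 > X), hch]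
      simp only
      rw [if_neg (by omega : ¬ N - pk - 1 > X), if_pos ((allzip_iff X _).mpr hall)]
    · rw [if_neg ((fun h => hall ((allzip_iff X _).mp h)) :
        ¬ (List.zip (sweepL (S.toList.take N.toNat) none)
            ((sweepL (S.toList.take N.toNat).reverse none).reverse)).all
          (fun lr => wifiCov X lr.1 || wifiCov X lr.2) = true)]
      have hnc : ¬ (p0 ≤ X ∧ ∃ pk, wifiChain X p0 rest = some pk ∧ N - pk - 1 ≤ X) :=
        fun h => hall ((coveredI_iff_coveredL S N X h0 hlen).mp (hiff.mp h))
      split_ifs with hgap hX0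
      · rfl
      · rfl
      · cases hch : wifiChain X p0 rest with
        | none => rfl
        | some pk =>
          simp only
          rw [if_pos (by
            by_contra hc
            exact hnc ⟨by omega, pk, hch, by omega⟩)]

theorem wifiRange_changed : Claim_changed_wifiRange := by
  unfold Claim_changed_wifiRange; decide

theorem wifiRange_tight : Claim_exact_wifiRange := by
  intro N S X _ hpre hD
  have hlen : N ≤ (S.toList.length : Int) := by simpa [PySem.Str.len_eq] using hpre
  unfold D_wifiRange at hD
  obtain ⟨hno', hdisj⟩ := hD
  rcases hdisj with ⟨hN1, hNX⟩ | ⟨hN0, hX⟩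
  case inr =>
    simp only [wifiRange, wifiRange_alt]
    rw [show N.toNat = 0 from by omega]
    simp only [wifiSweepFuel, wifiRangeLoopA, List.zip_nil_left, List.all_nil, if_true]
    rw [if_pos (by omega : N - 0 - 1 > X)]
    decide
  have h0 : 0 ≤ N := by omega
  have hno : ∀ c ∈ S.toList.take N.toNat, c ≠ '1' := by
    intro c hc
    have := List.all_eq_true.mp hno' c hc
    simpa using this
  have hfil := filter_nil_of_noRouter S N h0 hlen hno
  rw [alt_eq_sweeps S N X h0 hlen]
  unfold wifiRange
  rw [loopA_start S X N.toNat 0 (valid_idx S N hlen),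
    show (0:Int) + (N.toNat : Int) = N from by omega, hfil]
  change (if N - 0 - 1 > X then (0:Int) else 1) ≠ _
  have hlenl : (S.toList.take N.toNat).length = N.toNat := by
    simp only [List.length_take]; omega
  rw [if_neg (by omega : ¬ N - 0 - 1 > X),
    if_neg (by
      rw [allzip_iff]
      intro hall
      exact notCovered_of_noRouter _ X hno 0 (hall 0 (by omega)))]
  decide
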